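-- pv_equiv track=rewrite | github.com/SidoJain/AOC-2024 | d1p1.py | getDist
-- ===== SOURCE A (Python) =====
-- def getDist(firstList: list[str], secondList: list[int]) -> int:
--     firstList.sort()
--     secondList.sort()
--     dist = 0
--
--     while (len(firstList) > 0):
--         first = firstList.pop(0)
--         second = secondList.pop(0)
--         dist += abs(first - second)
--     return dist
-- ===== SOURCE B (Python) =====
-- def getDist(firstList, secondList):
--     return sum(abs(a - b) for a, b in zip(sorted(firstList), sorted(secondList)))
-- ===== Notes on version B (the rewrite author's own statement) =====
-- stated objective: faster
-- what changed: Replaces the while-loop that repeatedly pops from the front of both lists (pop(0) is O(n) each) with a single pass over zip of the two sorted lists; B also leaves the argument lists unmutated where A sorts and empties them in place.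
import Mathlib
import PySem

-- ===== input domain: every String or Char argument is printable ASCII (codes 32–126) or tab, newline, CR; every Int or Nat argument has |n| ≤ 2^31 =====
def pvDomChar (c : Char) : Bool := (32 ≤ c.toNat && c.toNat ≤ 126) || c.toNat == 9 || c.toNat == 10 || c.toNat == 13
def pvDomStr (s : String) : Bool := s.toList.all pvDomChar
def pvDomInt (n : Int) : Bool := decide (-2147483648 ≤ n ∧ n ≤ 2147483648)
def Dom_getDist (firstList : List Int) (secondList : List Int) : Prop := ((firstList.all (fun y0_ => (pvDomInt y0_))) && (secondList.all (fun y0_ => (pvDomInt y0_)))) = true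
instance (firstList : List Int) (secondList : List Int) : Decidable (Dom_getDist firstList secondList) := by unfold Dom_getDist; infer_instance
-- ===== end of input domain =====

-- B replaces A's quadratic pop(0)-from-front while-loop by one pass over the zip of the two
-- sorted lists (equivalence is about the RETURN value only: A sorts and empties its argument
-- lists in place, B leaves them untouched).


-- ===== PORT A =====
-- the while-loop: pop the front of both lists, add |first - second|, until firstList is empty.
-- When secondList runs out first, Python raises IndexError (excluded by Pre_); the port just
-- returns the accumulator there.
def getDistLoop : List Int → List Int → Int → Int
  | [], _, dist => dist
  | _ :: _, [], dist => dist      -- Python: secondList.pop(0) raises IndexError; outside Pre_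
  | f :: fs, s :: ss, dist => getDistLoop fs ss (dist + |f - s|)

def getDist (firstList : List Int) (secondList : List Int) : Int :=
  getDistLoop (PySem.List.sorted firstList (fun x => x) false)
              (PySem.List.sorted secondList (fun x => x) false) 0

-- ===== PORT B =====
def getDist_alt (firstList : List Int) (secondList : List Int) : Int :=
  (((PySem.List.sorted firstList (fun x => x) false).zip
      (PySem.List.sorted secondList (fun x => x) false)).map
    (fun p => |p.1 - p.2|)).sum

-- ===== PRECONDITION & SPEC =====
-- Pre_ excludes exactly the inputs where A raises IndexError (firstList longer than secondList).
def Pre_getDist (firstList : List Int) (secondList : List Int) : Prop :=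
  firstList.length ≤ secondList.length
instance (firstList : List Int) (secondList : List Int) : Decidable (Pre_getDist firstList secondList) := by unfold Pre_getDist; infer_instance
def pvWitness_getDist : List Int × List Int := ([3, 1, 2], [9, 2, 5])

def Spec_getDist (firstList : List Int) (secondList : List Int) (out : Int) : Prop := out = getDist_alt firstList secondList
instance (firstList : List Int) (secondList : List Int) (out : Int) : Decidable (Spec_getDist firstList secondList out) := by unfold Spec_getDist; infer_instance

-- ===== CLAIM (what is proved, stated in full; the proofs are below) =====
def Claim_equal_getDist : Prop := ∀ (firstList : List Int) (secondList : List Int), Dom_getDist firstList secondList → Pre_getDist firstList secondList → Spec_getDist firstList secondList (getDist firstList secondList)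

-- ===== LEMMAS AND PROOFS =====
-- A's loop with accumulator d equals d plus B's sum over the zip (for any two lists: both
-- stop at the shorter list).
theorem getDistLoop_eq_sum (fs ss : List Int) (d : Int) :
    getDistLoop fs ss d = d + ((fs.zip ss).map (fun p => |p.1 - p.2|)).sum := by
  induction fs generalizing ss d with
  | nil => simp [getDistLoop]
  | cons f fs ih =>
    cases ss with
    | nil => simp [getDistLoop]
    | cons s ss => simp [getDistLoop, ih]; ring

-- ===== VERDICT (by name: the statement is the Claim_ definition above) =====
theorem getDist_spec : Claim_equal_getDist := by
  intro fs ss _ _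
  unfold Spec_getDist getDist getDist_alt
  simpa using getDistLoop_eq_sum _ _ 0
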